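-- pv_equiv track=rewrite | github.com/paiml/depyler | examples/hard_functional_patterns.py | pipeline_transform
-- ===== SOURCE A (Python) =====
-- def pipeline_transform(vals: list[int]) -> int:
--     """Chain: filter positives -> double each -> sum all."""
--     # Step 1: filter positives
--     positives: list[int] = []
--     for v in vals:
--         if v > 0:
--             positives.append(v)
--     # Step 2: double each
--     doubled: list[int] = []
--     for v in positives:
--         doubled.append(v * 2)
--     # Step 3: sum
--     total: int = 0
--     for v in doubled:
--         total += v
--     return total
-- ===== SOURCE B (Python) =====
-- def pipeline_transform(vals: list[int]) -> int:
--     """Single accumulating pass: add v*2 for each positive v."""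
--     total = 0
--     for v in vals:
--         if v > 0:
--             total += v * 2
--     return total
-- ===== Notes on version B (the rewrite author's own statement) =====
-- stated objective: simpler
-- what changed: Replaced A's three separate loops building two intermediate lists (filter, then map, then sum) with one accumulating pass over the original list that adds v*2 for each positive v.
import Mathlib
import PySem

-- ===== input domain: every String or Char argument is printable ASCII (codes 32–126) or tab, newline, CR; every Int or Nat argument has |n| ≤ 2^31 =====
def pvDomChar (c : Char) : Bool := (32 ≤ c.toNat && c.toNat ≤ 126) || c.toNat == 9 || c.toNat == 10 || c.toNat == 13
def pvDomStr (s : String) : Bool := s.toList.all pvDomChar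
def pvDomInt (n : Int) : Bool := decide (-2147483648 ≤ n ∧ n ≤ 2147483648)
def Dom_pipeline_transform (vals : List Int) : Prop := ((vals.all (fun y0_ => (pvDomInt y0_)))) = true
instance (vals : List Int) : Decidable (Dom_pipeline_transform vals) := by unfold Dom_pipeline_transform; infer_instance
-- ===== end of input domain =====

-- ===== PORT A =====
-- three passes: filter positives, double each, then sum (literal transliteration of A)
def pipeline_transform (vals : List Int) : Int :=
  let positives : List Int := vals.foldl (fun acc v => if v > 0 then acc ++ [v] else acc) []
  let doubled : List Int := positives.foldl (fun acc v => acc ++ [v * 2]) []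
  doubled.foldl (fun total v => total + v) 0

-- ===== PORT B =====
-- B: one accumulating pass, no intermediate lists (simpler decomposition)
def pipeline_transform_alt (vals : List Int) : Int :=
  vals.foldl (fun total v => if v > 0 then total + v * 2 else total) 0

-- ===== PRECONDITION & SPEC =====
def Spec_pipeline_transform (vals : List Int) (out : Int) : Prop := out = pipeline_transform_alt vals
instance (vals : List Int) (out : Int) : Decidable (Spec_pipeline_transform vals out) := by unfold Spec_pipeline_transform; infer_instance

-- ===== CLAIM (what is proved, stated in full; the proofs are below) =====
def Claim_equal_pipeline_transform : Prop := ∀ (vals : List Int), Dom_pipeline_transform vals → Spec_pipeline_transform vals (pipeline_transform vals)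

-- ===== LEMMAS AND PROOFS =====

-- ===== VERDICT (by name: the statement is the Claim_ definition above) =====
theorem filt_acc (xs : List Int) (acc : List Int) :
    xs.foldl (fun acc v => if v > 0 then acc ++ [v] else acc) acc
      = acc ++ xs.filter (fun v => decide (v > 0)) := by
  induction xs generalizing acc with
  | nil => simp
  | cons x t ih =>
      by_cases hx : x > 0 <;> simp [List.foldl_cons, hx, ih]

theorem dbl_acc (xs : List Int) (acc : List Int) :
    xs.foldl (fun acc v => acc ++ [v * 2]) acc = acc ++ xs.map (fun v => v * 2) := by
  induction xs generalizing acc with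
  | nil => simp
  | cons x t ih => simp [List.foldl_cons, ih]

theorem sum_acc (xs : List Int) (t : Int) :
    xs.foldl (fun total v => total + v) t = t + xs.sum := by
  induction xs generalizing t with
  | nil => simp
  | cons x l ih => simp [List.foldl_cons, ih]; ring

theorem alt_acc (xs : List Int) (t : Int) :
    xs.foldl (fun total v => if v > 0 then total + v * 2 else total) t
      = t + ((xs.filter (fun v => decide (v > 0))).map (fun v => v * 2)).sum := by
  induction xs generalizing t with
  | nil => simp
  | cons x l ih =>
      by_cases hx : x > 0 <;>
        simp [List.foldl_cons, hx, ih] <;> ring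

theorem pipeline_transform_spec : Claim_equal_pipeline_transform := by
  intro vals _
  unfold Spec_pipeline_transform pipeline_transform pipeline_transform_alt
  simp only [filt_acc, dbl_acc, sum_acc, alt_acc, List.nil_append]
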